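-- pv_equiv track=rewrite | github.com/GiulioZhou/Morpho_Zero-Shot_NMT | morpho_segm/suffixRemover.py | _r1r2_standard
-- ===== SOURCE A (Python) =====
-- def _r1r2_standard(word, vowels):
-- 	"""
-- 	Return the standard interpretations of the string regions R1 and R2.
--
-- 	R1 is the region after the first non-vowel following a vowel,
-- 	or is the null region at the end of the word if there is no
-- 	such non-vowel.
--
-- 	R2 is the region after the first non-vowel following a vowel
-- 	in R1, or is the null region at the end of the word if there
-- 	is no such non-vowel.
--
-- 	:param word: The word whose regions R1 and R2 are determined.
-- 	:type word: str or unicode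
-- 	:param vowels: The vowels of the respective language that are
-- 				   used to determine the regions R1 and R2.
-- 	:type vowels: unicode
-- 	:return: (r1,r2), the regions R1 and R2 for the respective word.
-- 	:rtype: tuple
-- 	:note: This helper method is invoked by the respective stem method of
-- 		   the subclasses DutchStemmer, FinnishStemmer,
-- 		   FrenchStemmer, GermanStemmer, ItalianStemmer,
-- 		   PortugueseStemmer, RomanianStemmer, and SpanishStemmer.
-- 		   It is not to be invoked directly!
-- 	:note: A detailed description of how to define R1 and R2
-- 		   can be found at http://snowball.tartarus.org/texts/r1r2.html
--
-- 	"""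
-- 	r1 = ""
-- 	r2 = ""
-- 	for i in range(1, len(word)):
-- 		if word[i] not in vowels and word[i-1] in vowels:
-- 			r1 = word[i+1:]
-- 			break
--
-- 	for i in range(1, len(r1)):
-- 		if r1[i] not in vowels and r1[i-1] in vowels:
-- 			r2 = r1[i+1:]
-- 			break
--
-- 	return (r1, r2)
-- ===== SOURCE B (Python) =====
-- def _r1r2_standard(word, vowels):
--     """Same R1/R2 regions, computed by suffix trimming: drop leading
--     non-vowels, step past the vowel, drop vowels, step past the non-vowel."""
--     def region(s):
--         t = s
--         while t and t[0] not in vowels:   # find the first vowel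
--             t = t[1:]
--         t = t[1:]                          # step past it ('' stays '')
--         while t and t[0] in vowels:        # find the first non-vowel after it
--             t = t[1:]
--         return t[1:]                       # region after that non-vowel
--     r1 = region(word)
--     return (r1, region(r1))
-- ===== Notes on version B (the rewrite author's own statement) =====
-- stated objective: alternative
-- what changed: Replaces the adjacent-pair index scan (word[i] non-vowel and word[i-1] vowel) with a stateful suffix-trimming pass: drop leading non-vowels, step past the first vowel, drop following vowels, step past the first non-vowel; applied to the word for R1 and to R1 for R2; trades index arithmetic for slicing, which costs extra copying on long words.
import Mathlib
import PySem

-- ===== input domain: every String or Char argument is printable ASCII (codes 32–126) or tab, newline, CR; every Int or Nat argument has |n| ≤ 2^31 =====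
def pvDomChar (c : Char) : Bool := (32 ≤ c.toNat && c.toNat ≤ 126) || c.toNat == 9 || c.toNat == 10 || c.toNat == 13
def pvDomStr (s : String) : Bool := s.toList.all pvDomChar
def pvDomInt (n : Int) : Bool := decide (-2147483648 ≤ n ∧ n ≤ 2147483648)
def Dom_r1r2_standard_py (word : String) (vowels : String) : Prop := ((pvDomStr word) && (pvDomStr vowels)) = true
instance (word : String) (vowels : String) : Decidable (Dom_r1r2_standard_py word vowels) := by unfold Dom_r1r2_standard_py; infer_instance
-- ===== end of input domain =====

-- B computes the same R1/R2 regions by suffix trimming (find first vowel, then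
-- first non-vowel after it) instead of A's adjacent-pair index scan.

-- ===== PORT A =====
-- the for-loop 'for i in range(1, len(word)): if cond: r1 = word[i+1:]; break'
-- as recursion over the index list; 'word[i] in vowels' (1-char) = char membership
def aLoopR1 (w : List Char) (vs : List Char) : List Int → List Char
  | [] => []
  | i :: rest =>
    match PySem.List.pyGet? w i, PySem.List.pyGet? w (i - 1) with
    | some c, some p =>
      if ¬ vs.contains c ∧ vs.contains p then PySem.List.slice w (some (i + 1)) none
      else aLoopR1 w vs rest
    | _, _ => aLoopR1 w vs rest   -- unreachable: loop indices are in range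

def r1r2_standard_py (word : String) (vowels : String) : String × String :=
  let w := word.toList
  let vs := vowels.toList
  let r1 := aLoopR1 w vs (PySem.List.pyRange 1 (w.length : Int) 1)
  let r2 := aLoopR1 r1 vs (PySem.List.pyRange 1 (r1.length : Int) 1)
  (String.mk r1, String.mk r2)

-- ===== PORT B =====
-- 'while t and t[0] not in vowels: t = t[1:]'
def skipNonVowels (vs : List Char) : List Char → List Char
  | [] => []
  | c :: t => if vs.contains c then c :: t else skipNonVowels vs t

-- 'while t and t[0] in vowels: t = t[1:]'
def skipVowels (vs : List Char) : List Char → List Char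
  | [] => []
  | c :: t => if vs.contains c then skipVowels vs t else c :: t

-- region(s): trim non-vowels, step past the vowel, trim vowels, step past the non-vowel
def regionB (vs : List Char) (s : List Char) : List Char :=
  (skipVowels vs (skipNonVowels vs s).tail).tail

def r1r2_standard_py_alt (word : String) (vowels : String) : String × String :=
  let vs := vowels.toList
  let r1 := regionB vs word.toList
  (String.mk r1, String.mk (regionB vs r1))

-- ===== PRECONDITION & SPEC =====
def Spec_r1r2_standard_py (word : String) (vowels : String) (out : String × String) : Prop := out = r1r2_standard_py_alt word vowels
instance (word : String) (vowels : String) (out : String × String) : Decidable (Spec_r1r2_standard_py word vowels out) := by unfold Spec_r1r2_standard_py; infer_instance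

-- ===== CLAIM (what is proved, stated in full; the proofs are below) =====
def Claim_equal_r1r2_standard_py : Prop := ∀ (word : String) (vowels : String), Dom_r1r2_standard_py word vowels → Spec_r1r2_standard_py word vowels (r1r2_standard_py word vowels)

-- ===== LEMMAS AND PROOFS =====

-- intermediate characterisation of A's loop: a structural scan over adjacent pairs
def pairScan (vs : List Char) : List Char → List Char
  | [] => []
  | [_] => []
  | p :: c :: rest =>
    if ¬ vs.contains c ∧ vs.contains p then rest else pairScan vs (c :: rest)

theorem aLoop_eq_pairScan (vs : List Char) (u pre : List Char) :
    aLoopR1 (pre ++ u) vs (PySem.List.pyRange ((pre.length : Int) + 1) ((pre ++ u).length : Int) 1) = pairScan vs u := by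
  induction u generalizing pre with
  | nil =>
    rw [PySem.List.pyRange_one_eq_nil (by simp)]
    rfl
  | cons p t ih =>
    match t with
    | [] =>
      rw [PySem.List.pyRange_one_eq_nil (by simp)]
      rfl
    | c :: rest =>
      rw [PySem.List.pyRange_one_cons (by simp only [List.length_append, List.length_cons]; push_cast; omega)]
      show aLoopR1 _ _ _ = _
      unfold aLoopR1
      have h1 : PySem.List.pyGet? (pre ++ p :: c :: rest) ((pre.length : Int) + 1 - 1) = some p := by
        simpa using PySem.List.pyGet?_append_length pre (c :: rest) p
      have h2 : PySem.List.pyGet? (pre ++ p :: c :: rest) ((pre.length : Int) + 1) = some c := by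
        have := PySem.List.pyGet?_append_length (pre ++ [p]) rest c
        simpa [List.append_assoc, Int.add_comm] using this
      rw [h1, h2]
      by_cases hcond : ¬ vs.contains c ∧ vs.contains p
      · have hcond' : c ∉ vs ∧ p ∈ vs := by simpa using hcond
        simp only [hcond, if_pos]
        have hslice : ((pre.length : Int) + 1 + 1) = ((pre.length + 2 : Nat) : Int) := by push_cast; ring
        rw [hslice, PySem.List.slice_from_natCast]
        simp [pairScan, hcond'.1, hcond'.2]
      · simp only [hcond, if_neg, not_false_iff]
        have hpre : aLoopR1 (pre ++ p :: c :: rest) vs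
            (PySem.List.pyRange ((pre.length : Int) + 1 + 1) (((pre ++ p :: c :: rest).length : Int)) 1)
            = pairScan vs (c :: rest) := by
          have := ih (pre ++ [p])
          simpa [List.append_assoc, add_assoc, add_comm, add_left_comm] using this
        rw [hpre]
        have hcond' : ¬ (c ∉ vs ∧ p ∈ vs) := by simpa using hcond
        simp [pairScan, hcond']

theorem pairScan_eq_regionB (vs : List Char) (t : List Char) (p : Char) :
    pairScan vs (p :: t) = regionB vs (p :: t) := by
  induction t generalizing p with
  | nil =>
    by_cases hp : p ∈ vs <;>
      simp [pairScan, regionB, skipNonVowels, skipVowels, hp]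
  | cons c rest ih =>
    by_cases hp : p ∈ vs
    · by_cases hc : c ∈ vs
      · have h1 : pairScan vs (p :: c :: rest) = pairScan vs (c :: rest) := by
          simp [pairScan, hc]
        have h2 : regionB vs (p :: c :: rest) = (skipVowels vs rest).tail := by
          simp [regionB, skipNonVowels, skipVowels, hp, hc]
        have h3 : regionB vs (c :: rest) = (skipVowels vs rest).tail := by
          simp [regionB, skipNonVowels, skipVowels, hc]
        rw [h1, ih c, h2, h3]
      · simp [pairScan, regionB, skipNonVowels, skipVowels, hp, hc]
    · have h1 : pairScan vs (p :: c :: rest) = pairScan vs (c :: rest) := by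
        simp [pairScan, hp]
      have h2 : regionB vs (p :: c :: rest) = regionB vs (c :: rest) := by
        simp [regionB, skipNonVowels, hp]
      rw [h1, ih c, h2]

theorem aLoop_eq_regionB (vs w : List Char) :
    aLoopR1 w vs (PySem.List.pyRange 1 (w.length : Int) 1) = regionB vs w := by
  have h := aLoop_eq_pairScan vs w []
  simp only [List.nil_append, List.length_nil, Nat.cast_zero, zero_add] at h
  rw [h]
  match w with
  | [] => simp [pairScan, regionB, skipNonVowels, skipVowels]
  | p :: t => exact pairScan_eq_regionB vs t p

-- ===== VERDICT (by name: the statement is the Claim_ definition above) =====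
theorem r1r2_standard_py_spec : Claim_equal_r1r2_standard_py := by
  intro word vowels _
  show r1r2_standard_py word vowels = r1r2_standard_py_alt word vowels
  unfold r1r2_standard_py r1r2_standard_py_alt
  simp only [aLoop_eq_regionB]
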